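-- pv_equiv track=rewrite | github.com/erictao04/Reasoning-Motifs | motif_mining/v2/mine_token_motif_indicators.py | unique_contiguous_motifs
-- ===== SOURCE A (Python) =====
-- def unique_contiguous_motifs(tokens: list[str], min_len: int, max_len: int) -> set[str]:
--     motifs: set[str] = set()
--     if not tokens:
--         return motifs
--
--     n_tokens = len(tokens)
--     local_max = min(max_len, n_tokens)
--     for motif_len in range(max(1, min_len), local_max + 1):
--         for start in range(0, n_tokens - motif_len + 1):
--             motifs.add(" ".join(tokens[start : start + motif_len]))
--     return motifs
-- ===== SOURCE B (Python) =====
-- def unique_contiguous_motifs(tokens: list[str], min_len: int, max_len: int) -> set[str]: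
--     motifs: set[str] = set()
--     if not tokens:
--         return motifs
--
--     n = len(tokens)
--     lo = max(1, min_len)
--     hi = min(max_len, n)
--     if lo > hi:
--         return motifs
--     # Build the row of length-lo windows once, then extend every window by a
--     # single token per round instead of re-joining each slice from scratch.
--     windows = [" ".join(tokens[s:s + lo]) for s in range(n - lo + 1)]
--     motifs.update(windows)
--     for length in range(lo + 1, hi + 1):
--         windows = [" ".join((windows[s], tokens[s + length - 1]))
--                    for s in range(n - length + 1)]
--         motifs.update(windows)
--     return motifs
-- ===== Notes on version B (the rewrite author's own statement) =====
-- stated objective: alternative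
-- what changed: A re-joins every slice tokens[start:start+len] from scratch inside a len-by-start double loop; B builds the row of shortest windows once and then extends each window by a single token per length round (incremental joining), updating the set with the whole row, with an early return when the length range is empty.
import Mathlib
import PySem

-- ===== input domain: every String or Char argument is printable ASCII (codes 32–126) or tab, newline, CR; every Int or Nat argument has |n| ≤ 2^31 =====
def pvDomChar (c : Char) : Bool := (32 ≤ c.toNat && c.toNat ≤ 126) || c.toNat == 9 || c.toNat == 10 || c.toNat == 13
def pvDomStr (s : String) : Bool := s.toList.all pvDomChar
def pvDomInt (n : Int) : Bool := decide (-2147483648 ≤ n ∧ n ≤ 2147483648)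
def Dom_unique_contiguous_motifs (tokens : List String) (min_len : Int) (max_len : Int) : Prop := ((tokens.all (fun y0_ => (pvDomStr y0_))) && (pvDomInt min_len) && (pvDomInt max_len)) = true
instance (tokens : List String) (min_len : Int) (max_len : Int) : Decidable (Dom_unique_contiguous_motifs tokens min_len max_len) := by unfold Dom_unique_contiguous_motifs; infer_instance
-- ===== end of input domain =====

-- B replaces A's slice-and-rejoin double loop by one 'windows' array that is extended
-- by a single token per length round (incremental joining); same set, same insertion order.

-- ===== PORT A =====
def unique_contiguous_motifs (tokens : List String) (min_len : Int) (max_len : Int) : List String :=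
  if tokens = [] then []
  else
    let n : Int := tokens.length
    let local_max : Int := min max_len n
    (PySem.List.pyRange (max 1 min_len) (local_max + 1)).foldl
      (fun motifs motif_len =>
        (PySem.List.pyRange 0 (n - motif_len + 1)).foldl
          (fun motifs start =>
            PySem.Set.add motifs
              (PySem.Str.join " " (PySem.List.slice tokens (some start) (some (start + motif_len)))))
          motifs)
      []

-- ===== PORT B =====
def unique_contiguous_motifs_alt (tokens : List String) (min_len : Int) (max_len : Int) : List String :=
  if tokens = [] then []
  else
    let n : Int := tokens.length
    let lo : Int := max 1 min_len
    let hi : Int := min max_len n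
    if lo > hi then []
    else
      let windows0 :=
        (PySem.List.pyRange 0 (n - lo + 1)).map
          (fun s => PySem.Str.join " " (PySem.List.slice tokens (some s) (some (s + lo))))
      let st :=
        (PySem.List.pyRange (lo + 1) (hi + 1)).foldl
          (fun (st : List String × List String) len =>
            let windows :=
              (PySem.List.pyRange 0 (n - len + 1)).map
                (fun s => PySem.Str.join " "
                  [PySem.List.pyGetD st.1 s "", PySem.List.pyGetD tokens (s + len - 1) ""])
            (windows, PySem.Set.update st.2 windows))
          (windows0, PySem.Set.update [] windows0)
      st.2

-- ===== PRECONDITION & SPEC =====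
def Spec_unique_contiguous_motifs (tokens : List String) (min_len : Int) (max_len : Int) (out : List String) : Prop := out = unique_contiguous_motifs_alt tokens min_len max_len
instance (tokens : List String) (min_len : Int) (max_len : Int) (out : List String) : Decidable (Spec_unique_contiguous_motifs tokens min_len max_len out) := by unfold Spec_unique_contiguous_motifs; infer_instance

-- ===== CLAIM (what is proved, stated in full; the proofs are below) =====
def Claim_equal_unique_contiguous_motifs : Prop := ∀ (tokens : List String) (min_len : Int) (max_len : Int), Dom_unique_contiguous_motifs tokens min_len max_len → Spec_unique_contiguous_motifs tokens min_len max_len (unique_contiguous_motifs tokens min_len max_len)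

-- ===== LEMMAS AND PROOFS =====

-- the motif starting at s of length L
def pvJ (tokens : List String) (s L : Nat) : String :=
  PySem.Str.join " " ((tokens.drop s).take L)

-- all motifs of length L, by start
def pvW (tokens : List String) (L : Nat) : List String :=
  (List.range (tokens.length - L + 1)).map (fun s => pvJ tokens s L)

-- the motif set after all lengths lo..K have been processed
def pvM (tokens : List String) (lo : Nat) : Nat → List String
  | 0 => []
  | K + 1 => if lo ≤ K + 1 then PySem.Set.update (pvM tokens lo K) (pvW tokens (K + 1)) else pvM tokens lo K

theorem pvM_of_lt (tokens : List String) (lo : Nat) : ∀ K, K < lo → pvM tokens lo K = [] := by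
  intro K
  induction K with
  | zero => intro _; rfl
  | succ K ih =>
    intro h
    simp only [pvM]
    rw [if_neg (by omega), ih (by omega)]

theorem chars_join_append_singleton (sep : List Char) (ps : List (List Char)) (q : List Char)
    (h : ps ≠ []) :
    PySem.Chars.join sep (ps ++ [q]) = PySem.Chars.join sep ps ++ sep ++ q := by
  induction ps with
  | nil => exact absurd rfl h
  | cons p ps ih =>
    cases ps with
    | nil => simp [PySem.Chars.join_cons_cons, PySem.Chars.join_singleton]
    | cons p' ps' =>
      rw [show (p :: p' :: ps') ++ [q] = p :: p' :: (ps' ++ [q]) from rfl,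
        PySem.Chars.join_cons_cons,
        show p' :: (ps' ++ [q]) = (p' :: ps') ++ [q] from rfl,
        ih (by simp), PySem.Chars.join_cons_cons]
      simp [List.append_assoc]

theorem pvJ_succ (tokens : List String) (s L : Nat) (hL : 1 ≤ L) (h : s + L < tokens.length) :
    pvJ tokens s (L + 1) = PySem.Str.join " " [pvJ tokens s L, tokens.getD (s + L) ""] := by
  unfold pvJ
  rw [← String.toList_inj, PySem.Str.toList_join, PySem.Str.toList_join]
  have hlt : L < (tokens.drop s).length := by simp; omega
  have htake : (tokens.drop s).take (L + 1) = (tokens.drop s).take L ++ [tokens[s + L]] := by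
    rw [List.take_add_one]
    congr 1
    rw [List.getElem?_eq_getElem hlt]
    simp [List.getElem_drop]
  rw [htake, List.map_append, List.map_cons, List.map_cons, List.map_nil,
    chars_join_append_singleton _ _ _ (by
      have : (tokens.drop s).take L ≠ [] := by
        apply List.ne_nil_of_length_pos
        simp; omega
      simpa using this)]
  simp only [List.map_cons, List.map_nil]
  rw [PySem.Chars.join_cons_cons, PySem.Chars.join_singleton, PySem.Str.toList_join]
  rw [List.getD_eq_getElem tokens "" h]

theorem lo_toNat_iff (min_len : Int) (K : Nat) :
    (max 1 min_len).toNat ≤ K ↔ (K : Int) ≥ max 1 min_len := by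
  rw [Int.toNat_le]

-- A's inner loop over starts is one Set.update with pvW
theorem inner_A (tokens : List String) (m : List String) (L : Nat) (_hL1 : 1 ≤ L)
    (hLn : L ≤ tokens.length) :
    (PySem.List.pyRange 0 ((tokens.length : Int) - L + 1)).foldl
      (fun motifs start =>
        PySem.Set.add motifs
          (PySem.Str.join " " (PySem.List.slice tokens (some start) (some (start + L)))))
      m = PySem.Set.update m (pvW tokens L) := by
  have hcast : (tokens.length : Int) - L + 1 = ((tokens.length - L + 1 : Nat) : Int) := by
    push_cast; omega
  rw [hcast, PySem.List.pyRange_zero_nat, List.foldl_map]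
  unfold PySem.Set.update pvW
  rw [List.foldl_map]
  apply PySem.List.foldl_congr_mem
  intro acc k _
  rw [PySem.List.slice_natCast_add tokens k L]
  rfl

theorem outer_A (tokens : List String) (min_len : Int) :
    ∀ K : Nat, K ≤ tokens.length →
      (PySem.List.pyRange (max 1 min_len) ((K : Int) + 1)).foldl
        (fun motifs motif_len =>
          (PySem.List.pyRange 0 ((tokens.length : Int) - motif_len + 1)).foldl
            (fun motifs start =>
              PySem.Set.add motifs
                (PySem.Str.join " " (PySem.List.slice tokens (some start) (some (start + motif_len)))))
            motifs)
        [] = pvM tokens (max 1 min_len).toNat K := by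
  intro K
  induction K with
  | zero =>
    intro _
    rw [PySem.List.pyRange_one_eq_nil (by omega)]
    rfl
  | succ K ih =>
    intro hK
    by_cases hlo : max 1 min_len ≤ (K : Int) + 1
    · have : ((K + 1 : Nat) : Int) + 1 = ((K : Int) + 1) + 1 := by push_cast; ring
      rw [this, PySem.List.pyRange_one_succ_right hlo, List.foldl_append, ih (by omega)]
      simp only [List.foldl_cons, List.foldl_nil]
      have h1 : ((K : Int) + 1) = ((K + 1 : Nat) : Int) := by push_cast; ring
      rw [h1, inner_A tokens _ (K + 1) (by omega) (by omega)]
      show _ = pvM tokens (max 1 min_len).toNat (K + 1)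
      simp only [pvM]
      rw [if_pos (by rw [lo_toNat_iff]; push_cast at hlo ⊢; omega)]
    · rw [PySem.List.pyRange_one_eq_nil (by push_cast at hlo ⊢; omega)]
      simp only [List.foldl_nil]
      rw [pvM_of_lt tokens _ (K + 1) (by
        have := (lo_toNat_iff min_len (K + 1)).mpr
        by_contra hc
        exact hlo (by push_cast at *; omega))]

theorem A_eq (tokens : List String) (min_len max_len : Int) (h : tokens ≠ []) :
    unique_contiguous_motifs tokens min_len max_len
      = pvM tokens (max 1 min_len).toNat (min max_len (tokens.length : Int)).toNat := by
  unfold unique_contiguous_motifs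
  rw [if_neg h]
  simp only []
  by_cases hhi : 0 ≤ min max_len (tokens.length : Int)
  · have : min max_len (tokens.length : Int) = ((min max_len (tokens.length : Int)).toNat : Int) := by
      omega
    rw [this]
    exact outer_A tokens min_len (min max_len (tokens.length : Int)).toNat (by omega)
  · rw [PySem.List.pyRange_one_eq_nil (by omega)]
    have : (min max_len (tokens.length : Int)).toNat = 0 := by omega
    rw [this]
    rfl

-- a whole row of length-L motifs, built by slicing and joining (B's base row)
theorem rowA (tokens : List String) (L : Nat) (hLn : L ≤ tokens.length) :
    (PySem.List.pyRange 0 ((tokens.length : Int) - L + 1)).map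
      (fun s => PySem.Str.join " " (PySem.List.slice tokens (some s) (some (s + (L : Int)))))
      = pvW tokens L := by
  have hcast : (tokens.length : Int) - L + 1 = ((tokens.length - L + 1 : Nat) : Int) := by
    push_cast; omega
  rw [hcast, PySem.List.pyRange_zero_nat, List.map_map]
  unfold pvW
  apply List.map_congr_left
  intro k _
  simp only [Function.comp_apply]
  rw [PySem.List.slice_natCast_add tokens k L]
  rfl

theorem pvM_base (tokens : List String) (lo : Nat) (h : 1 ≤ lo) :
    pvM tokens lo lo = PySem.Set.update [] (pvW tokens lo) := by
  cases lo with
  | zero => omega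
  | succ m =>
    simp only [pvM]
    rw [if_pos (by omega), pvM_of_lt tokens (m + 1) m (by omega)]

-- B's loop invariant: one round per length, each window extended by one token
theorem loop_B (tokens : List String) (lo : Nat) (hlo : 1 ≤ lo) :
    ∀ K : Nat, lo ≤ K → K ≤ tokens.length →
      (PySem.List.pyRange ((lo : Int) + 1) ((K : Int) + 1)).foldl
        (fun (st : List String × List String) len =>
          let windows :=
            (PySem.List.pyRange 0 ((tokens.length : Int) - len + 1)).map
              (fun s => PySem.Str.join " "
                [PySem.List.pyGetD st.1 s "", PySem.List.pyGetD tokens (s + len - 1) ""])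
          (windows, PySem.Set.update st.2 windows))
        (pvW tokens lo, PySem.Set.update [] (pvW tokens lo))
      = (pvW tokens K, pvM tokens lo K) := by
  intro K hK
  induction K, hK using Nat.le_induction with
  | base =>
    intro _
    rw [PySem.List.pyRange_one_eq_nil (by omega)]
    rw [pvM_base tokens lo hlo]
    rfl
  | succ K hK ih =>
    intro hKn
    have hstep : ((K + 1 : Nat) : Int) + 1 = ((K : Int) + 1) + 1 := by push_cast; ring
    rw [hstep, PySem.List.pyRange_one_succ_right (by omega), List.foldl_append, ih (by omega)]
    simp only [List.foldl_cons, List.foldl_nil]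
    have hwin :
        (PySem.List.pyRange 0 ((tokens.length : Int) - ((K : Int) + 1) + 1)).map
          (fun s => PySem.Str.join " "
            [PySem.List.pyGetD (pvW tokens K) s "",
             PySem.List.pyGetD tokens (s + ((K : Int) + 1) - 1) ""])
          = pvW tokens (K + 1) := by
      have hKpos : 1 ≤ K := by omega
      have hcast : (tokens.length : Int) - ((K : Int) + 1) + 1
          = ((tokens.length - (K + 1) + 1 : Nat) : Int) := by push_cast; omega
      rw [hcast, PySem.List.pyRange_zero_nat, List.map_map]
      unfold pvW
      apply List.ext_getElem
      · simp
      · intro i h1 h2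
        simp only [List.getElem_map, List.getElem_range, Function.comp_apply]
        have hi : i < tokens.length - (K + 1) + 1 := by simpa using h1
        have e1 : PySem.List.pyGetD
            ((List.range (tokens.length - K + 1)).map (fun s => pvJ tokens s K)) ((i : Nat) : Int) ""
            = pvJ tokens i K := by
          rw [PySem.List.pyGetD_natCast,
            List.getD_eq_getElem _ _ (by simp; omega), List.getElem_map, List.getElem_range]
        have e2 : PySem.List.pyGetD tokens ((i : Int) + ((K : Int) + 1) - 1) ""
            = tokens.getD (i + K) "" := by
          have : (i : Int) + ((K : Int) + 1) - 1 = ((i + K : Nat) : Int) := by push_cast; ring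
          rw [this, PySem.List.pyGetD_natCast]
        rw [e1, e2, pvJ_succ tokens i K hKpos (by omega)]
    rw [hwin]
    show _ = (pvW tokens (K + 1), pvM tokens lo (K + 1))
    simp only [pvM]
    rw [if_pos (by omega)]

theorem B_eq (tokens : List String) (min_len max_len : Int) (h : tokens ≠ []) :
    unique_contiguous_motifs_alt tokens min_len max_len
      = pvM tokens (max 1 min_len).toNat (min max_len (tokens.length : Int)).toNat := by
  unfold unique_contiguous_motifs_alt
  rw [if_neg h]
  simp only []
  by_cases hord : max 1 min_len > min max_len (tokens.length : Int)
  · rw [if_pos hord]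
    rw [pvM_of_lt tokens _ _ (by omega)]
  · rw [if_neg hord]
    have hlo : max 1 min_len = (((max 1 min_len).toNat : Nat) : Int) := by omega
    have hhi : min max_len (tokens.length : Int) = (((min max_len (tokens.length : Int)).toNat : Nat) : Int) := by
      omega
    rw [hlo, hhi, rowA tokens (max 1 min_len).toNat (by omega),
      loop_B tokens (max 1 min_len).toNat (by omega)
        (min max_len (tokens.length : Int)).toNat (by omega) (by omega)]
    rfl

-- ===== VERDICT (by name: the statement is the Claim_ definition above) =====
theorem unique_contiguous_motifs_spec : Claim_equal_unique_contiguous_motifs := by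
  intro tokens min_len max_len _
  unfold Spec_unique_contiguous_motifs
  by_cases h : tokens = []
  · subst h; rfl
  · rw [A_eq tokens min_len max_len h, B_eq tokens min_len max_len h]
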